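-- pv_equiv track=rewrite | github.com/Cho-El/Python-coding-test-practice | 프로그래머스 문제/파이썬/2023 카카오블라이드채용/택배 배달과 수거하기.py | solution
-- ===== SOURCE A (Python) =====
-- def solution(cap, n, deliveries, pickups):
--     answer = 0
--     while deliveries or pickups:
--         deliveriesLength = 0
--         pickupsLength = 0
--         capD = cap
--         capP = cap
--         while deliveries:
--             if deliveries[-1] == 0:
--                 deliveries.pop()
--             else:
--                 deliveriesLength = len(deliveries)
--                 break
--         while pickups:
--             if pickups[-1] == 0:
--                 pickups.pop()
--             else:
--                 pickupsLength = len(pickups)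
--                 break
--         while deliveries:
--             num = deliveries.pop()
--             capD -= num
--             if capD >= 0:
--                 continue
--             else:
--                 deliveries.append(abs(capD))
--                 break
--         while pickups:
--             num = pickups.pop()
--             capP -= num
--             if capP >= 0:
--                 continue
--             else:
--                 pickups.append(abs(capP))
--                 break
--         answer += 2 * max(deliveriesLength, pickupsLength)
--
--     return answer
-- ===== SOURCE B (Python) =====
-- def solution(cap, n, deliveries, pickups):
--     # Non-mutating re-implementation: each list is represented by a cursor (j, r)
--     # standing for lst[:j-1] + [r] (empty when j == 0), so no list is ever copied,
--     # popped or appended to.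
--     def step(lst, j, r):
--         while j > 0 and r == 0:          # drop trailing zeros
--             j -= 1
--             if j > 0:
--                 r = lst[j - 1]
--         if j == 0:
--             return 0, 0, 0
--         length = j
--         c = cap - r                      # take up to cap boxes from the far end
--         j -= 1
--         while j > 0 and c >= 0:
--             c -= lst[j - 1]
--             j -= 1
--         if c >= 0:
--             return length, 0, 0
--         return length, j + 1, -c         # -c boxes are left at position j
--     answer = 0
--     dj, dr = len(deliveries), (deliveries[-1] if deliveries else 0)
--     pj, pr = len(pickups), (pickups[-1] if pickups else 0)
--     while dj > 0 or pj > 0: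
--         ld, dj, dr = step(deliveries, dj, dr)
--         lp, pj, pr = step(pickups, pj, pr)
--         answer += 2 * max(ld, lp)
--     return answer
-- ===== Notes on version B (the rewrite author's own statement) =====
-- stated objective: alternative
-- what changed: Replaced A's destructive list surgery (per trip: trim trailing zeros by pop, pop elements off the tail, append the leftover back, for both lists) by a non-mutating cursor (index, remainder) per list: B never copies, pops or appends, it only moves an index and one carried value, and it leaves the caller's lists untouched (A consumes them in place).
import Mathlib
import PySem

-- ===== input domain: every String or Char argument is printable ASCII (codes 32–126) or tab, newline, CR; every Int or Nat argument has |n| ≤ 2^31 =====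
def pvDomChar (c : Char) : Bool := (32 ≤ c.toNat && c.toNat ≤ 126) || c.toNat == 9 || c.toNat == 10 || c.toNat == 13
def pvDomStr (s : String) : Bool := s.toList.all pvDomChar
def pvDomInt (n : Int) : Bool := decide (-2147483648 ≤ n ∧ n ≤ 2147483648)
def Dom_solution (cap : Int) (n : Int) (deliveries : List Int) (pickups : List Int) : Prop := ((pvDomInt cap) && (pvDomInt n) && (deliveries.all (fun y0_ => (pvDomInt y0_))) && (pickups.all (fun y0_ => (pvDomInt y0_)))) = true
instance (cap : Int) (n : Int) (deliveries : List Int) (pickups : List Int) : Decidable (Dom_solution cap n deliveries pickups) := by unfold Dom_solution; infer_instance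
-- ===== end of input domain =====

-- B replaces A's destructive list surgery (pop/append/trim on both lists every trip) by a
-- non-mutating cursor (index, remainder) per list (objective: alternative, no copying/mutation).
-- A mutates its list arguments in place (B does not); the equivalence proved here is about the return value only.

-- ===== PORT A =====
-- A's inner `while deliveries: if deliveries[-1]==0: pop else: break` loop
def trimA (xs : List Int) : List Int :=
  if h : xs = [] then []
  else if xs.getLast h = 0 then trimA xs.dropLast else xs
termination_by xs.length
decreasing_by
  simp only [List.length_dropLast]
  have := List.length_pos_iff.mpr h
  omega

-- A's inner `while deliveries: num = deliveries.pop(); capD -= num; …` loop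
def consumeA (c : Int) (xs : List Int) : List Int :=
  if h : xs = [] then []
  else
    if 0 ≤ c - xs.getLast h then consumeA (c - xs.getLast h) xs.dropLast
    else xs.dropLast ++ [|c - xs.getLast h|]
termination_by xs.length
decreasing_by
  simp only [List.length_dropLast]
  have := List.length_pos_iff.mpr h
  omega

-- A's outer `while deliveries or pickups` loop; the fuel only makes the recursion total
-- (each iteration strictly decreases lengths + positive parts, so the fuel passed by
-- `solution` never runs out when the Python loop terminates)
def loopA (cap : Int) : Nat → List Int → List Int → Int → Int
  | 0, _, _, a => a
  | fuel+1, ds, ps, a =>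
    if ds = [] ∧ ps = [] then a
    else
      let ds1 := trimA ds
      let ps1 := trimA ps
      let ds2 := consumeA cap ds1
      let ps2 := consumeA cap ps1
      loopA cap fuel ds2 ps2 (a + 2 * max (ds1.length : Int) (ps1.length : Int))

def posSum (xs : List Int) : Nat := (xs.map Int.toNat).sum

def solution (cap : Int) (n : Int) (deliveries : List Int) (pickups : List Int) : Int :=
  loopA cap
    (deliveries.length + pickups.length + posSum deliveries + posSum pickups + 1)
    deliveries pickups 0

-- ===== PORT B =====
-- Source B's `while j > 0 and r == 0: …` trimming loop of `step`
def trimC (lst : List Int) : Nat → Int → Nat × Int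
  | 0, r => (0, r)
  | j+1, r =>
    if r = 0 then
      trimC lst j (if 0 < j then PySem.List.pyGetD lst ((j : Int) - 1) 0 else r)
    else (j+1, r)

-- Source B's `while j > 0 and c >= 0: c -= lst[j-1]; j -= 1` loop of `step`
def consumeC (lst : List Int) : Nat → Int → Nat × Int
  | 0, c => (0, c)
  | j+1, c =>
    if 0 ≤ c then consumeC lst j (c - PySem.List.pyGetD lst (j : Int) 0)
    else (j+1, c)

-- Source B's `step(lst, j, r)`: returns (length for this trip, new j, new r)
def stepC (cap : Int) (lst : List Int) (j : Nat) (r : Int) : Nat × Nat × Int :=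
  let t := trimC lst j r
  if t.1 = 0 then (0, 0, 0)
  else
    let u := consumeC lst (t.1 - 1) (cap - t.2)
    if 0 ≤ u.2 then (t.1, 0, 0) else (t.1, u.1 + 1, -u.2)

-- Source B's `while dj > 0 or pj > 0` loop; the fuel only makes the recursion total
def loopB (cap : Int) (l1 l2 : List Int) : Nat → Nat → Int → Nat → Int → Int → Int
  | 0, _, _, _, _, ans => ans
  | fuel+1, dj, dr, pj, pr, ans =>
    if 0 < dj ∨ 0 < pj then
      let s1 := stepC cap l1 dj dr
      let s2 := stepC cap l2 pj pr
      loopB cap l1 l2 fuel s1.2.1 s1.2.2 s2.2.1 s2.2.2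
        (ans + 2 * max (s1.1 : Int) (s2.1 : Int))
    else ans

def solution_alt (cap : Int) (n : Int) (deliveries : List Int) (pickups : List Int) : Int :=
  loopB cap deliveries pickups
    (deliveries.length + pickups.length + posSum deliveries + posSum pickups + 1)
    deliveries.length
    (if deliveries.isEmpty then 0 else PySem.List.pyGetD deliveries (-1) 0)
    pickups.length
    (if pickups.isEmpty then 0 else PySem.List.pyGetD pickups (-1) 0)
    0

-- ===== PRECONDITION & SPEC =====
def Spec_solution (cap : Int) (n : Int) (deliveries : List Int) (pickups : List Int) (out : Int) : Prop := out = solution_alt cap n deliveries pickups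
instance (cap : Int) (n : Int) (deliveries : List Int) (pickups : List Int) (out : Int) : Decidable (Spec_solution cap n deliveries pickups out) := by unfold Spec_solution; infer_instance

-- ===== CLAIM (what is proved, stated in full; the proofs are below) =====
def Claim_equal_solution : Prop := ∀ (cap : Int) (n : Int) (deliveries : List Int) (pickups : List Int), Dom_solution cap n deliveries pickups → Spec_solution cap n deliveries pickups (solution cap n deliveries pickups)

-- ===== LEMMAS AND PROOFS =====

-- unfolding equations for A's inner loops on a list with last element exposed
theorem trimA_nil : trimA ([] : List Int) = [] := by rw [trimA]; simp

theorem trimA_append_zero (l : List Int) : trimA (l ++ [(0 : Int)]) = trimA l := by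
  rw [trimA, dif_neg (by simp : ¬ l ++ [(0 : Int)] = [])]
  simp only [List.getLast_concat, List.dropLast_concat]
  simp

theorem trimA_append_nz (l : List Int) (r : Int) (hr : r ≠ 0) :
    trimA (l ++ [r]) = l ++ [r] := by
  rw [trimA, dif_neg (by simp : ¬ l ++ [r] = [])]
  simp only [List.getLast_concat]
  rw [if_neg hr]

theorem consumeA_nil (c : Int) : consumeA c [] = [] := by rw [consumeA]; simp

theorem consumeA_append_pos (l : List Int) (c r : Int) (hc : 0 ≤ c - r) :
    consumeA c (l ++ [r]) = consumeA (c - r) l := by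
  rw [consumeA, dif_neg (by simp : ¬ l ++ [r] = [])]
  simp only [List.getLast_concat, List.dropLast_concat]
  rw [if_pos hc]

theorem consumeA_append_neg (l : List Int) (c r : Int) (hc : ¬ 0 ≤ c - r) :
    consumeA c (l ++ [r]) = l ++ [-(c - r)] := by
  rw [consumeA, dif_neg (by simp : ¬ l ++ [r] = [])]
  simp only [List.getLast_concat, List.dropLast_concat]
  rw [if_neg hc, abs_of_neg (by omega)]

-- the list that B's cursor (j, r) stands for
def reprC (lst : List Int) (j : Nat) (r : Int) : List Int :=
  if j = 0 then [] else lst.take (j - 1) ++ [r]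

theorem reprC_zero (lst : List Int) (r : Int) : reprC lst 0 r = [] := rfl

theorem reprC_eq_nil_iff (lst : List Int) (j : Nat) (r : Int) :
    reprC lst j r = [] ↔ j = 0 := by
  unfold reprC
  split_ifs with h
  · simp [h]
  · simp [h]

theorem reprC_length {lst : List Int} {j : Nat} (r : Int) (hj : j ≤ lst.length) :
    (reprC lst j r).length = j := by
  unfold reprC
  split_ifs with h
  · simp [h]
  · simp
    omega

theorem reprC_succ (lst : List Int) (j : Nat) (r : Int) :
    reprC lst (j + 1) r = lst.take j ++ [r] := by
  simp [reprC]

theorem take_succ_getElem {lst : List Int} {j : Nat} (hj : j < lst.length) :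
    lst.take (j + 1) = lst.take j ++ [lst[j]] := by
  rw [List.take_succ]
  simp [List.getElem?_eq_getElem hj]

theorem pyGetD_at (lst : List Int) (j : Nat) (hj : j < lst.length) :
    PySem.List.pyGetD lst (j : Int) 0 = lst[j] := by
  rw [PySem.List.pyGetD_natCast, List.getD_eq_getElem lst 0 hj]

-- trimming: B's cursor loop computes A's trailing-zero trimming
theorem trim_corr (lst : List Int) :
    ∀ (j : Nat) (r : Int), j ≤ lst.length →
      trimA (reprC lst j r) = reprC lst (trimC lst j r).1 (trimC lst j r).2
      ∧ (trimC lst j r).1 ≤ j := by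
  intro j
  induction j with
  | zero =>
    intro r _
    constructor
    · rw [reprC_zero, trimA_nil]
      rfl
    · exact le_rfl
  | succ j ih =>
    intro r hj
    rw [reprC_succ]
    by_cases hr : r = 0
    · subst hr
      have htc : trimC lst (j + 1) 0
          = trimC lst j (if 0 < j then PySem.List.pyGetD lst ((j : Int) - 1) 0 else 0) := by
        simp [trimC]
      rw [trimA_append_zero, htc]
      rcases Nat.eq_zero_or_pos j with hj0 | hjpos
      · subst hj0
        constructor
        · rw [List.take_zero, trimA_nil]
          rfl
        · exact Nat.zero_le _
      · have hjlt : j - 1 < lst.length := by omega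
        have hr' : (if 0 < j then PySem.List.pyGetD lst ((j : Int) - 1) 0 else 0)
            = lst[j - 1] := by
          rw [if_pos hjpos]
          have hcast : ((j : Int) - 1) = ((j - 1 : Nat) : Int) := by omega
          rw [hcast, pyGetD_at lst (j - 1) hjlt]
        have hrepr : reprC lst j lst[j - 1] = lst.take j := by
          unfold reprC
          rw [if_neg (by omega)]
          rw [(take_succ_getElem hjlt).symm, show j - 1 + 1 = j by omega]
        rw [hr']
        have hih := ih lst[j - 1] (by omega)
        rw [hrepr] at hih
        exact ⟨hih.1, by omega⟩
    · have htc : trimC lst (j + 1) r = (j + 1, r) := by simp [trimC, hr]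
      rw [trimA_append_nz _ _ hr, htc, reprC_succ]
      exact ⟨rfl, le_rfl⟩

-- the consume loop exits immediately on a negative budget
theorem consumeC_neg (lst : List Int) (m : Nat) {c : Int} (hc : c < 0) :
    consumeC lst m c = (m, c) := by
  cases m with
  | zero => rfl
  | succ k => simp [consumeC, not_le.mpr hc]

-- consuming: B's cursor loop computes A's pop-until-over-capacity loop
theorem consume_corr (lst : List Int) :
    ∀ (m : Nat) (c : Int), m ≤ lst.length → 0 ≤ c →
      consumeA c (lst.take m)
        = (if 0 ≤ (consumeC lst m c).2 then []
           else lst.take (consumeC lst m c).1 ++ [-(consumeC lst m c).2])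
      ∧ (consumeC lst m c).1 ≤ m := by
  intro m
  induction m with
  | zero =>
    intro c _ hc
    refine ⟨?_, le_rfl⟩
    rw [List.take_zero, consumeA_nil]
    simp [consumeC, hc]
  | succ m ih =>
    intro c hm hc
    have hmlt : m < lst.length := by omega
    have htake : lst.take (m + 1) = lst.take m ++ [lst[m]] := take_succ_getElem hmlt
    have hcc : consumeC lst (m + 1) c = consumeC lst m (c - lst[m]) := by
      simp [consumeC, hc, pyGetD_at lst m hmlt]
    by_cases hc' : 0 ≤ c - lst[m]
    · rw [htake, consumeA_append_pos _ _ _ hc', hcc]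
      have hih := ih (c - lst[m]) (by omega) hc'
      exact ⟨hih.1, by omega⟩
    · have hcn : consumeC lst m (c - lst[m]) = (m, c - lst[m]) :=
        consumeC_neg lst m (by omega)
      rw [htake, consumeA_append_neg _ _ _ hc', hcc, hcn]
      constructor
      · rw [if_neg (show ¬ 0 ≤ (m, c - lst[m]).2 from hc')]
      · simp

-- one trip of Source B's `step` = A's trim, record the length, consume
theorem step_corr (cap : Int) (lst : List Int) (j : Nat) (r : Int) (hj : j ≤ lst.length) :
    ((trimA (reprC lst j r)).length : Int) = ((stepC cap lst j r).1 : Int)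
    ∧ consumeA cap (trimA (reprC lst j r))
        = reprC lst (stepC cap lst j r).2.1 (stepC cap lst j r).2.2
    ∧ (stepC cap lst j r).2.1 ≤ lst.length := by
  obtain ⟨hT, hj1⟩ := trim_corr lst j r hj
  set j1 := (trimC lst j r).1 with hj1def
  set r1 := (trimC lst j r).2 with hr1def
  have hstep : stepC cap lst j r
      = (if j1 = 0 then (0, 0, 0)
         else
           let u := consumeC lst (j1 - 1) (cap - r1)
           if 0 ≤ u.2 then (j1, 0, 0) else (j1, u.1 + 1, -u.2)) := by
    simp [stepC, ← hj1def, ← hr1def]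
  rcases Nat.eq_zero_or_pos j1 with h0 | hpos
  · rw [hstep, if_pos h0, hT, h0]
    refine ⟨by simp [reprC], ?_, by simp⟩
    rw [reprC_zero, consumeA_nil]
    rfl
  · have hj1len : j1 ≤ lst.length := le_trans hj1 hj
    have hrepr1 : reprC lst j1 r1 = lst.take (j1 - 1) ++ [r1] := by
      unfold reprC
      rw [if_neg (by omega)]
    have hlen : ((trimA (reprC lst j r)).length : Int) = (j1 : Int) := by
      rw [hT, reprC_length r1 hj1len]
    by_cases hc : 0 ≤ cap - r1
    · obtain ⟨hCA, hCle⟩ := consume_corr lst (j1 - 1) (cap - r1) (by omega) hc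
      have hcons : consumeA cap (reprC lst j1 r1)
          = consumeA (cap - r1) (lst.take (j1 - 1)) := by
        rw [hrepr1, consumeA_append_pos _ _ _ hc]
      set u := consumeC lst (j1 - 1) (cap - r1) with hudef
      by_cases hu : 0 ≤ u.2
      · rw [hstep, if_neg (by omega)]
        simp only [← hudef, if_pos hu]
        refine ⟨hlen, ?_, by simp⟩
        rw [hT, hcons, hCA, if_pos hu, reprC_zero]
      · rw [hstep, if_neg (by omega)]
        simp only [← hudef, if_neg hu]
        refine ⟨hlen, ?_, by simp; omega⟩
        rw [hT, hcons, hCA, if_neg hu]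
        unfold reprC
        rw [if_neg (by omega)]
        simp
    · have hcons : consumeA cap (reprC lst j1 r1)
          = lst.take (j1 - 1) ++ [-(cap - r1)] := by
        rw [hrepr1, consumeA_append_neg _ _ _ hc]
      have hcn : consumeC lst (j1 - 1) (cap - r1) = (j1 - 1, cap - r1) :=
        consumeC_neg lst (j1 - 1) (by omega)
      rw [hstep, if_neg (by omega), hcn]
      simp only [if_neg hc]
      refine ⟨hlen, ?_, by simp; omega⟩
      rw [hT, hcons]
      unfold reprC
      rw [if_neg (by omega)]
      simp

-- the two outer loops are bisimilar (same fuel, corresponding states)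
theorem loop_bisim (cap : Int) (l1 l2 : List Int) :
    ∀ (fuel : Nat) (dj : Nat) (dr : Int) (pj : Nat) (pr : Int) (ans : Int),
      dj ≤ l1.length → pj ≤ l2.length →
      loopA cap fuel (reprC l1 dj dr) (reprC l2 pj pr) ans
        = loopB cap l1 l2 fuel dj dr pj pr ans := by
  intro fuel
  induction fuel with
  | zero => intro dj dr pj pr ans _ _; rfl
  | succ fuel ih =>
    intro dj dr pj pr ans hdj hpj
    by_cases hE : dj = 0 ∧ pj = 0
    · obtain ⟨h1, h2⟩ := hE
      subst h1; subst h2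
      simp [loopA, loopB, reprC]
    · have hEA : ¬(reprC l1 dj dr = [] ∧ reprC l2 pj pr = []) := by
        rw [reprC_eq_nil_iff, reprC_eq_nil_iff]
        exact hE
      have hEB : 0 < dj ∨ 0 < pj := by omega
      obtain ⟨hlen1, hcons1, hb1⟩ := step_corr cap l1 dj dr hdj
      obtain ⟨hlen2, hcons2, hb2⟩ := step_corr cap l2 pj pr hpj
      have hA : loopA cap (fuel + 1) (reprC l1 dj dr) (reprC l2 pj pr) ans
          = loopA cap fuel (consumeA cap (trimA (reprC l1 dj dr)))
              (consumeA cap (trimA (reprC l2 pj pr)))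
              (ans + 2 * max ((trimA (reprC l1 dj dr)).length : Int)
                ((trimA (reprC l2 pj pr)).length : Int)) := by
        simp [loopA, hEA]
      have hB : loopB cap l1 l2 (fuel + 1) dj dr pj pr ans
          = loopB cap l1 l2 fuel (stepC cap l1 dj dr).2.1 (stepC cap l1 dj dr).2.2
              (stepC cap l2 pj pr).2.1 (stepC cap l2 pj pr).2.2
              (ans + 2 * max ((stepC cap l1 dj dr).1 : Int)
                ((stepC cap l2 pj pr).1 : Int)) := by
        simp [loopB, hEB]
      rw [hA, hB, hcons1, hcons2, hlen1, hlen2]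
      exact ih _ _ _ _ _ hb1 hb2

-- the initial cursor stands for the whole list
theorem reprC_self (lst : List Int) :
    reprC lst lst.length (if lst.isEmpty then 0 else PySem.List.pyGetD lst (-1) 0) = lst := by
  by_cases h : lst = []
  · subst h; rfl
  · have hlen : 0 < lst.length := List.length_pos_iff.mpr h
    have hget : PySem.List.pyGetD lst (-1) 0 = lst.getLast h := PySem.List.pyGetD_neg_one lst 0 h
    unfold reprC
    rw [if_neg (by omega)]
    have hie : lst.isEmpty = false := by simp [h]
    rw [hie, if_neg (by simp), hget, ← List.dropLast_eq_take]
    exact List.dropLast_append_getLast h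

-- ===== VERDICT (by name: the statement is the Claim_ definition above) =====
theorem solution_spec : Claim_equal_solution := by
  intro cap n ds ps _
  unfold Spec_solution solution solution_alt
  conv_lhs => rw [← reprC_self ds, ← reprC_self ps]
  rw [loop_bisim cap ds ps _ _ _ _ _ 0 le_rfl le_rfl]
  rw [reprC_self, reprC_self]
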